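-- pv_equiv track=rewrite | github.com/aliramazon/daily-dsa-python | 05_rotate-right-till-zero.py | rotate_right_till_zero_v3
-- ===== SOURCE A (Python) =====
-- def rotate_right_till_zero_v3(numbers):
--     result = []
--     zero_pos = 0
--
--     for idx, value in enumerate(numbers):
--         if value == 0:
--             zero_pos = idx
--         result.append(0)
--
--     offset = len(numbers) - 1 - zero_pos
--
--     for idx, value in enumerate(numbers):
--         new_pos = (idx + offset) % len(numbers)
--         result[new_pos] = value
--     return result
-- ===== SOURCE B (Python) =====
-- def rotate_right_till_zero_v3(numbers):
--     zero_pos = next((idx for idx, value in reversed(list(enumerate(numbers))) if value == 0), 0)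
--     split = zero_pos + 1
--     return list(numbers[split:]) + list(numbers[:split])
-- ===== Notes on version B (the rewrite author's own statement) =====
-- stated objective: simpler
-- what changed: Replaces the two passes (zero-filled result then per-element modular placement) with a single reversed scan for the last zero plus one slice concatenation producing the same right-rotation.
import Mathlib
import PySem

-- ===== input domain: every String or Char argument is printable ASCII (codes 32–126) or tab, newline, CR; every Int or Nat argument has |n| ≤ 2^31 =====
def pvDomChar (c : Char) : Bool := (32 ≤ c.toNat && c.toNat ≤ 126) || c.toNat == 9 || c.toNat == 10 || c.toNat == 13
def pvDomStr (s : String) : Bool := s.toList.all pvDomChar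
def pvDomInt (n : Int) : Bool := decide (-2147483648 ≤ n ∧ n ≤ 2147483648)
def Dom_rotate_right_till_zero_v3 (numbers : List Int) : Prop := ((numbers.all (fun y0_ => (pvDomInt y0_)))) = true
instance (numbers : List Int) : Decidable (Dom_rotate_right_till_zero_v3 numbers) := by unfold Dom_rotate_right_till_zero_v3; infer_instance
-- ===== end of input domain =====

-- B replaces A's two passes (zero-fill then per-element modular placement) by a reversed
-- scan for the last zero plus one slice concatenation: simpler, same O(n) cost.


-- ===== PORT A =====
-- first loop: builds result (all zeros) and tracks the last index holding 0;
-- second loop: result[(idx+offset) % len] = value — the index is always in range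
-- (0 ≤ mod < len for len > 0; the loop is empty for len = 0), so pySetD is exact.
def rotate_right_till_zero_v3 (numbers : List Int) : List Int :=
  let st := (PySem.List.enumerate numbers 0).foldl
      (fun (st : List Int × Int) (iv : Int × Int) =>
        (st.1 ++ [(0 : Int)], if iv.2 == 0 then iv.1 else st.2)) (([] : List Int), (0 : Int))
  let offset : Int := (numbers.length : Int) - 1 - st.2
  (PySem.List.enumerate numbers 0).foldl
    (fun res (iv : Int × Int) =>
      PySem.List.pySetD res (PySem.Int.mod (iv.1 + offset) (numbers.length : Int)) iv.2)
    st.1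

-- ===== PORT B =====
def rotate_right_till_zero_v3_alt (numbers : List Int) : List Int :=
  let zero_pos : Int :=
    match (PySem.List.enumerate numbers 0).reverse.find? (fun iv => iv.2 == 0) with
    | some iv => iv.1
    | none => 0
  let split : Int := zero_pos + 1
  PySem.List.slice numbers (some split) none ++ PySem.List.slice numbers none (some split)

-- ===== PRECONDITION & SPEC =====
def Spec_rotate_right_till_zero_v3 (numbers : List Int) (out : List Int) : Prop := out = rotate_right_till_zero_v3_alt numbers
instance (numbers : List Int) (out : List Int) : Decidable (Spec_rotate_right_till_zero_v3 numbers out) := by unfold Spec_rotate_right_till_zero_v3; infer_instance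

-- ===== CLAIM (what is proved, stated in full; the proofs are below) =====
def Claim_equal_rotate_right_till_zero_v3 : Prop := ∀ (numbers : List Int), Dom_rotate_right_till_zero_v3 numbers → Spec_rotate_right_till_zero_v3 numbers (rotate_right_till_zero_v3 numbers)

-- ===== LEMMAS AND PROOFS =====

-- A's first loop, split into its two components: the zero-filled result and the last-zero fold.
theorem pairFold_eq (l : List (Int × Int)) (r : List Int) (z : Int) :
    l.foldl (fun (st : List Int × Int) (iv : Int × Int) =>
        (st.1 ++ [(0 : Int)], if iv.2 == 0 then iv.1 else st.2)) (r, z)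
      = (r ++ List.replicate l.length 0,
         l.foldl (fun (z : Int) (iv : Int × Int) => if iv.2 == 0 then iv.1 else z) z) := by
  induction l generalizing r z with
  | nil => simp
  | cons iv l ih => rw [List.foldl_cons, ih]; simp [List.replicate_succ]

-- keeping the LAST matching index while folding forward = first match of the reversed list.
theorem lastFold_eq (l : List (Int × Int)) (z : Int) :
    l.foldl (fun (z : Int) (iv : Int × Int) => if iv.2 == 0 then iv.1 else z) z
      = (match l.reverse.find? (fun iv => iv.2 == 0) with
         | some iv => iv.1
         | none => z) := by
  induction l generalizing z with
  | nil => simp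
  | cons iv l ih =>
      simp only [List.foldl_cons, ih, List.reverse_cons, List.find?_append]
      cases h : l.reverse.find? (fun iv => iv.2 == 0) with
      | some a => simp
      | none => by_cases hz : iv.2 == 0 <;> simp [List.find?, hz]

-- writing values at consecutive positions splices them into the list.
theorem setConsec (vs : List Int) (s d : Int) (r : List Int)
    (hnn : 0 ≤ s + d) (hle : (s + d).toNat + vs.length ≤ r.length) :
    (PySem.List.enumerate vs s).foldl
        (fun (res : List Int) (iv : Int × Int) => res.set (iv.1 + d).toNat iv.2) r
      = r.take (s + d).toNat ++ vs ++ r.drop ((s + d).toNat + vs.length) := by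
  induction vs generalizing s r with
  | nil => simp
  | cons v vs ih =>
      have hp : (s + d).toNat < r.length := by simp at hle; omega
      have h1 : (s + 1 + d).toNat = (s + d).toNat + 1 := by omega
      rw [PySem.List.enumerate_cons, List.foldl_cons]
      rw [ih (s + 1) (r.set (s + d).toNat v) (by omega) (by simp at hle ⊢; omega)]
      rw [h1]
      have htake : (r.set (s + d).toNat v).take ((s + d).toNat + 1)
          = r.take (s + d).toNat ++ [v] := by
        rw [List.set_eq_take_append_cons_drop, if_pos hp, List.take_append]
        simp [Nat.min_eq_left (le_of_lt hp)]
      have hdrop : (r.set (s + d).toNat v).drop ((s + d).toNat + 1 + vs.length)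
          = r.drop ((s + d).toNat + 1 + vs.length) := List.drop_set_of_lt (by omega)
      rw [htake, hdrop]
      have hidx : (s + d).toNat + (v :: vs).length = (s + d).toNat + 1 + vs.length := by
        simp; omega
      rw [hidx]
      simp [List.append_assoc]

-- the last-zero index of B (and, via the folds above, of A): bounds.
theorem zero_pos_bounds (numbers : List Int) (h : numbers ≠ []) :
    0 ≤ (match (PySem.List.enumerate numbers 0).reverse.find? (fun iv => iv.2 == 0) with
         | some iv => iv.1
         | none => (0 : Int))
    ∧ (match (PySem.List.enumerate numbers 0).reverse.find? (fun iv => iv.2 == 0) with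
       | some iv => iv.1
       | none => (0 : Int)) < (numbers.length : Int) := by
  cases hf : (PySem.List.enumerate numbers 0).reverse.find? (fun iv => iv.2 == 0) with
  | none =>
      have : 0 < numbers.length := List.length_pos_iff.mpr h
      exact ⟨by simp, by simp; omega⟩
  | some a =>
      have hm : a ∈ (PySem.List.enumerate numbers 0).reverse := List.mem_of_find?_eq_some hf
      rw [List.mem_reverse] at hm
      rw [PySem.List.mem_enumerate_iff] at hm
      obtain ⟨k, hk, rfl⟩ := hm
      simp
      omega

-- A's placement loop, for a last-zero index t < len: it reproduces the right-rotation by len-1-t.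
theorem secondLoop (numbers : List Int) (t : Nat) (ht : t < numbers.length) :
    (PySem.List.enumerate numbers 0).foldl
        (fun (res : List Int) (iv : Int × Int) =>
          PySem.List.pySetD res
            (PySem.Int.mod (iv.1 + ((numbers.length : Int) - 1 - (t : Int))) (numbers.length : Int)) iv.2)
        (List.replicate numbers.length 0)
      = numbers.drop (t + 1) ++ numbers.take (t + 1) := by
  have hlen_take : (numbers.take (t + 1)).length = t + 1 := by
    simp [Nat.min_eq_left (by omega : t + 1 ≤ numbers.length)]
  have hsplit : PySem.List.enumerate numbers 0
      = PySem.List.enumerate (numbers.take (t + 1)) 0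
        ++ PySem.List.enumerate (numbers.drop (t + 1)) (((t + 1 : Nat) : Int)) := by
    conv_lhs => rw [← List.take_append_drop (t + 1) numbers]
    rw [PySem.List.enumerate_append, hlen_take]
    norm_num
  rw [hsplit, List.foldl_append]
  -- first chunk (the inner fold): indices 0..t land, without wrap, at positions (len-1-t)..(len-1)
  have hchunk1 : (PySem.List.enumerate (numbers.take (t + 1)) 0).foldl
      (fun (res : List Int) (iv : Int × Int) =>
        PySem.List.pySetD res
          (PySem.Int.mod (iv.1 + ((numbers.length : Int) - 1 - (t : Int))) (numbers.length : Int)) iv.2)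
      (List.replicate numbers.length 0)
      = List.replicate (numbers.length - 1 - t) (0 : Int) ++ numbers.take (t + 1) := by
    rw [PySem.List.foldl_congr_mem _ _
        (fun (res : List Int) (iv : Int × Int) =>
          res.set (iv.1 + ((numbers.length : Int) - 1 - (t : Int))).toNat iv.2) _
        (by
          intro acc iv hm
          rw [PySem.List.mem_enumerate_iff] at hm
          obtain ⟨k, hk, rfl⟩ := hm
          rw [hlen_take] at hk
          have hmod : PySem.Int.mod (((0 : Int) + (k : Nat)) + ((numbers.length : Int) - 1 - (t : Int))) (numbers.length : Int)
              = ((0 : Int) + (k : Nat)) + ((numbers.length : Int) - 1 - (t : Int)) := by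
            rw [PySem.Int.mod_eq_emod_of_pos (by omega)]
            exact Int.emod_eq_of_lt (by omega) (by omega)
          rw [hmod, PySem.List.pySetD_of_nonneg _ _ (by omega)])]
    rw [setConsec _ 0 ((numbers.length : Int) - 1 - (t : Int)) _ (by omega)
        (by simp [hlen_take]; omega)]
    have hp1 : ((0 : Int) + ((numbers.length : Int) - 1 - (t : Int))).toNat = numbers.length - 1 - t := by omega
    rw [hp1, hlen_take]
    simp [List.take_replicate, List.drop_replicate, Nat.min_eq_left (by omega : numbers.length - 1 - t ≤ numbers.length),
      show numbers.length - (numbers.length - 1 - t + (t + 1)) = 0 by omega]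
  rw [hchunk1]
  -- second chunk (the outer fold): indices t+1..len-1 wrap to positions 0..len-t-2
  rw [PySem.List.foldl_congr_mem _ _
      (fun (res : List Int) (iv : Int × Int) =>
        res.set (iv.1 + (-(t : Int) - 1)).toNat iv.2) _
      (by
        intro acc iv hm
        rw [PySem.List.mem_enumerate_iff] at hm
        obtain ⟨k, hk, rfl⟩ := hm
        have hk' : k < numbers.length - (t + 1) := by simpa using hk
        have hmod : PySem.Int.mod ((((t + 1 : Nat) : Int) + (k : Nat)) + ((numbers.length : Int) - 1 - (t : Int))) (numbers.length : Int)
            = (((t + 1 : Nat) : Int) + (k : Nat)) + (-(t : Int) - 1) := by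
          rw [PySem.Int.mod_eq_emod_of_pos (by omega)]
          rw [show (((t + 1 : Nat) : Int) + (k : Nat)) + ((numbers.length : Int) - 1 - (t : Int))
              = ((((t + 1 : Nat) : Int) + (k : Nat)) + (-(t : Int) - 1)) + (numbers.length : Int) by push_cast; ring]
          rw [← Int.emod_eq_add_self_emod]
          exact Int.emod_eq_of_lt (by push_cast; omega) (by push_cast; omega)
        rw [hmod, PySem.List.pySetD_of_nonneg _ _ (by push_cast; omega)])]
  rw [setConsec _ (((t + 1 : Nat) : Int)) (-(t : Int) - 1) _ (by push_cast; omega)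
      (by simp [hlen_take]; omega)]
  have hp2 : ((((t + 1 : Nat) : Int)) + (-(t : Int) - 1)).toNat = 0 := by push_cast; omega
  rw [hp2]
  simp only [List.take_zero, List.nil_append, Nat.zero_add]
  have hlen_drop : (numbers.drop (t + 1)).length = numbers.length - 1 - t := by
    simp; omega
  rw [hlen_drop, List.drop_left' (by simp)]

-- ===== VERDICT (by name: the statement is the Claim_ definition above) =====
theorem rotate_right_till_zero_v3_spec : Claim_equal_rotate_right_till_zero_v3 := by
  intro numbers _
  unfold Spec_rotate_right_till_zero_v3 rotate_right_till_zero_v3 rotate_right_till_zero_v3_alt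
  by_cases hnil : numbers = []
  · subst hnil; rfl
  · simp only [pairFold_eq, lastFold_eq, PySem.List.length_enumerate, List.nil_append]
    obtain ⟨hz0, hzlt⟩ := zero_pos_bounds numbers hnil
    set z : Int := (match (PySem.List.enumerate numbers 0).reverse.find? (fun iv => iv.2 == 0) with
      | some iv => iv.1
      | none => (0 : Int)) with hzdef
    have hzt : z = ((z.toNat : Nat) : Int) := by omega
    have ht : z.toNat < numbers.length := by omega
    rw [hzt]
    rw [secondLoop numbers z.toNat ht]
    have hsf : PySem.List.slice numbers (some (((z.toNat : Nat) : Int) + 1)) none = numbers.drop (z.toNat + 1) := by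
      rw [show (((z.toNat : Nat) : Int) + 1) = (((z.toNat + 1 : Nat)) : Int) by push_cast; ring]
      exact PySem.List.slice_from_natCast ..
    have hst : PySem.List.slice numbers none (some (((z.toNat : Nat) : Int) + 1)) = numbers.take (z.toNat + 1) := by
      rw [show (((z.toNat : Nat) : Int) + 1) = (((z.toNat + 1 : Nat)) : Int) by push_cast; ring]
      exact PySem.List.slice_to_natCast ..
    rw [hsf, hst]
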